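-- pv_equiv track=rewrite | github.com/kspra3/Algorithms-and-Programming-Fundamentals | FIT1045Sol/Workshop10/Task1A.py | getPositions
-- ===== SOURCE A (Python) =====
-- def getPositions(T,n):
--     rows = []
--     for i in range(n):
--         T.append(i)
--         if checkSolution(T)==True:
--             rows.append(i)
--         T.pop()
--     return rows
--
-- def checkSolution(T):
--     return (checkRow(T) and checkColumn(T) and checkDiagonal(T))
--
-- def checkRow(T):
--     for i in range(len(T)):
--         for c in range(i + 1 ,len(T)):
--             if T[i] == T[c]:
--                 return False
--     return True
--
-- def checkColumn(T):
--     for i in range(len(T)):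
--         if T[i] == '':
--             return False
--     return True
--
-- def checkDiagonal(T):
--     for i in range(len(T) - 1):
--         if abs(T[i] - T[i + 1]) == 1:
--             return False
--     return True
-- ===== SOURCE B (Python) =====
-- def getPositions(T, n):
--     # one-time validity check of the prefix, then a single pass over range(n)
--     if len(set(T)) != len(T) or any(abs(a - b) == 1 for a, b in zip(T, T[1:])):
--         return []
--     forbidden = set(T)
--     if T:
--         forbidden.add(T[-1] - 1)
--         forbidden.add(T[-1] + 1)
--     return [i for i in range(n) if i not in forbidden]
-- ===== Notes on version B (the rewrite author's own statement) =====
-- stated objective: faster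
-- what changed: Instead of appending each candidate and re-running the full checkSolution (pairwise row scan + adjacent-diagonal scan) per candidate, B validates the prefix T once (duplicate check via a set, adjacency via one zip pass) and then does a single pass over range(n) testing membership in a precomputed forbidden set (elements of T plus T[-1]±1).
import Mathlib
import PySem

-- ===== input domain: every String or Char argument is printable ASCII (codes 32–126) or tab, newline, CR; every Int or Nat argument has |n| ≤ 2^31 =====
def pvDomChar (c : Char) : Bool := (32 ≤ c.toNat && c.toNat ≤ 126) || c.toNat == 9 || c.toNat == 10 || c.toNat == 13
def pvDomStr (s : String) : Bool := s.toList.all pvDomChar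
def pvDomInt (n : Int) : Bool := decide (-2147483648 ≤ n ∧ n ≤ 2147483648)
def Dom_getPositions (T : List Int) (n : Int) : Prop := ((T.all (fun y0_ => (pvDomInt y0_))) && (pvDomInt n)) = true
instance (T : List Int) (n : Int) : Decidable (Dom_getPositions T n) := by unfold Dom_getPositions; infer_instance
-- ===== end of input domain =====

-- B replaces A's per-candidate append/checkSolution/pop loop (which re-validates the whole
-- prefix for every candidate) by a one-time validity check of the prefix plus a single
-- membership pass over range(n); return value only: A temporarily appends/pops on T but
-- restores it before returning, so the list argument is unchanged on return in both.

-- ===== PORT A =====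
def checkRow (T : List Int) : Bool :=
  (List.range T.length).all (fun i =>
    (List.range' (i+1) (T.length - (i+1))).all (fun c =>
      !(T.getD i 0 == T.getD c 0)))

-- Python's `T[i] == ''` compares an int with a string; on List Int inputs that comparison
-- is always False, so the `return False` branch never fires.
def checkColumn (T : List Int) : Bool :=
  (List.range T.length).all (fun _i => true)

def checkDiagonal (T : List Int) : Bool :=
  (List.range (T.length - 1)).all (fun i =>
    !((T.getD i 0 - T.getD (i+1) 0).natAbs == 1))

def checkSolution (T : List Int) : Bool :=
  checkRow T && checkColumn T && checkDiagonal T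

-- `rows = []; rows.append(i)`: a Python list with O(1) append is an Array here
def getPositions (T : List Int) (n : Int) : List Int :=
  ((PySem.List.pyRange 0 n 1).foldl
    (fun rows i => if checkSolution (T ++ [i]) then rows.push i else rows) #[]).toList

-- ===== PORT B =====
def getPositions_alt (T : List Int) (n : Int) : List Int :=
  if PySem.Set.len (PySem.Set.ofList T) ≠ (T.length : Int)
      ∨ (T.zip T.tail).any (fun p => (p.1 - p.2).natAbs == 1) then []
  else
    let forbidden := PySem.Set.ofList T
    let forbidden := match T.getLast? with
      | none => forbidden
      | some t => PySem.Set.add (PySem.Set.add forbidden (t - 1)) (t + 1)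
    (PySem.List.pyRange 0 n 1).filter (fun i => !(PySem.Set.contains forbidden i))

-- ===== PRECONDITION & SPEC =====
def Spec_getPositions (T : List Int) (n : Int) (out : List Int) : Prop := out = getPositions_alt T n
instance (T : List Int) (n : Int) (out : List Int) : Decidable (Spec_getPositions T n out) := by unfold Spec_getPositions; infer_instance

-- ===== CLAIM (what is proved, stated in full; the proofs are below) =====
def Claim_equal_getPositions : Prop := ∀ (T : List Int) (n : Int), Dom_getPositions T n → Spec_getPositions T n (getPositions T n)

-- ===== LEMMAS AND PROOFS =====

lemma checkRow_iff (T : List Int) : checkRow T = true ↔ T.Nodup := by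
  rw [List.Nodup, List.pairwise_iff_getElem]
  simp only [checkRow, List.all_eq_true, List.mem_range, List.mem_range'_1,
    Bool.not_eq_eq_eq_not, Bool.not_true, beq_eq_false_iff_ne, ne_eq]
  constructor
  · intro h i j hi hj hij
    have hje : j ≤ i + 1 + (T.length - (i + 1)) - 1 := by omega
    have := h i hi j ⟨by omega, by omega⟩
    rwa [List.getD_eq_getElem _ _ hi, List.getD_eq_getElem _ _ hj] at this
  · intro h i hi c hc
    have hcl : c < T.length := by omega
    rw [List.getD_eq_getElem _ _ hi, List.getD_eq_getElem _ _ hcl]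
    exact h i c hi hcl (by omega)

lemma checkDiagonal_iff (T : List Int) :
    checkDiagonal T = true ↔
      ∀ i : Nat, (h : i + 1 < T.length) → (T[i] - T[i+1]).natAbs ≠ 1 := by
  simp only [checkDiagonal, List.all_eq_true, List.mem_range,
    Bool.not_eq_eq_eq_not, Bool.not_true, beq_eq_false_iff_ne, ne_eq]
  constructor
  · intro h i hi
    have := h i (by omega)
    rwa [List.getD_eq_getElem _ _ (by omega), List.getD_eq_getElem _ _ hi] at this
  · intro h i hi
    have hi1 : i + 1 < T.length := by omega
    rw [List.getD_eq_getElem _ _ (by omega), List.getD_eq_getElem _ _ hi1]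
    exact h i hi1

lemma checkColumn_true (T : List Int) : checkColumn T = true := by
  simp [checkColumn]

lemma zipAny_iff (T : List Int) :
    ((T.zip T.tail).any (fun p => (p.1 - p.2).natAbs == 1) = false) ↔
      ∀ i : Nat, (h : i + 1 < T.length) → (T[i] - T[i+1]).natAbs ≠ 1 := by
  rw [List.any_eq_false]
  constructor
  · intro h i hi
    have hz : i < (T.zip T.tail).length := by
      simp [List.length_zip, List.length_tail]; omega
    have := h (T.zip T.tail)[i] (List.getElem_mem hz)
    rw [List.getElem_zip, List.getElem_tail] at this
    simpa using this
  · intro h x hx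
    obtain ⟨i, hi, rfl⟩ := List.mem_iff_getElem.mp hx
    have hlen : i + 1 < T.length := by
      have := hi; simp [List.length_zip, List.length_tail] at this; omega
    rw [List.getElem_zip, List.getElem_tail]
    simpa using h i hlen

lemma foldl_add_sublist (T s : List Int) :
    (T.foldl PySem.Set.add s).Sublist (s ++ T) := by
  induction T generalizing s with
  | nil => simp
  | cons x T ih =>
    refine (ih (PySem.Set.add s x)).trans ?_
    have : (PySem.Set.add s x).Sublist (s ++ [x]) := by
      unfold PySem.Set.add
      split
      · exact List.sublist_append_left s [x]
      · exact List.Sublist.refl _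
    calc (PySem.Set.add s x ++ T).Sublist (s ++ [x] ++ T) := this.append_right T
      _ = s ++ x :: T := by simp

lemma ofList_sublist (T : List Int) : (PySem.Set.ofList T).Sublist T := by
  have := foldl_add_sublist T []
  simpa [PySem.Set.ofList_eq_foldl] using this

lemma ofList_eq_self_of_nodup (T : List Int) (h : T.Nodup) : PySem.Set.ofList T = T := by
  induction T using List.reverseRecOn with
  | nil => rfl
  | append_singleton T x ih =>
    rw [List.nodup_append] at h
    have hx : x ∉ T := by
      intro hm; exact (h.2.2 x hm x (by simp) rfl)
    have hstep : PySem.Set.ofList (T ++ [x]) = PySem.Set.add (PySem.Set.ofList T) x := by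
      rw [PySem.Set.ofList_eq_foldl, PySem.Set.ofList_eq_foldl, List.foldl_append]
      rfl
    rw [hstep, ih h.1]
    unfold PySem.Set.add
    have hc : PySem.Set.contains T x = false := by
      rw [← Bool.not_eq_true, PySem.Set.contains_iff]; exact hx
    rw [hc]
    simp

lemma ofList_len_iff (T : List Int) :
    PySem.Set.len (PySem.Set.ofList T) = (T.length : Int) ↔ T.Nodup := by
  constructor
  · intro h
    have hlen : (PySem.Set.ofList T).length = T.length := by
      unfold PySem.Set.len at h; exact_mod_cast h
    have := (ofList_sublist T).eq_of_length hlen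
    rw [← this]; exact PySem.Set.nodup_ofList T
  · intro h
    rw [ofList_eq_self_of_nodup T h]; rfl

lemma checkSolution_append_iff (T : List Int) (i : Int) (hN : T.Nodup)
    (hD : ∀ j : Nat, (h : j + 1 < T.length) → (T[j] - T[j+1]).natAbs ≠ 1) :
    (checkSolution (T ++ [i]) = true) ↔
      (i ∉ T ∧ ∀ t, T.getLast? = some t → (t - i).natAbs ≠ 1) := by
  rw [checkSolution, Bool.and_eq_true, Bool.and_eq_true, checkRow_iff,
    checkDiagonal_iff]
  constructor
  · rintro ⟨⟨hrow, -⟩, hdiag⟩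
    rw [List.nodup_append] at hrow
    refine ⟨fun hm => hrow.2.2 i hm i (by simp) rfl, ?_⟩
    intro t ht
    obtain ⟨ys, rfl⟩ := List.getLast?_eq_some_iff.mp ht
    have hlen : ys.length + 1 < (ys ++ [t] ++ [i]).length := by simp
    have := hdiag ys.length (by simp)
    have h1 : (ys ++ [t] ++ [i])[ys.length]'(by simp) = t := by
      rw [List.getElem_append_left (by simp)]
      simp
    have h2 : (ys ++ [t] ++ [i])[ys.length + 1]'(by simp) = i := by
      rw [List.getElem_append_right (by simp)]
      simp
    rwa [h1, h2] at this
  · rintro ⟨hmem, hlast⟩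
    refine ⟨⟨?_, checkColumn_true _⟩, ?_⟩
    · rw [List.nodup_append]
      exact ⟨hN, List.nodup_singleton i, by
        intro a ha b hb
        simp at hb; subst hb
        intro h; exact hmem (h ▸ ha)⟩
    · intro j hj
      rw [List.length_append, List.length_singleton] at hj
      by_cases hjl : j + 1 < T.length
      · rw [List.getElem_append_left (by omega), List.getElem_append_left hjl]
        exact hD j hjl
      · have hje : j + 1 = T.length := by omega
        have h1 : (T ++ [i])[j]'(by simp; omega) = T[j]'(by omega) :=
          List.getElem_append_left (by omega)
        have h2 : (T ++ [i])[j+1]'(by simp; omega) = i := by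
          rw [List.getElem_append_right (by omega)]
          simp [hje]
        rw [h1, h2]
        have ht : T.getLast? = some (T[j]'(by omega)) := by
          rw [List.getLast?_eq_getElem?]
          rw [List.getElem?_eq_getElem (by omega)]
          congr 1
          congr 1
          omega
        exact hlast _ ht

lemma mem_forbidden (T : List Int) (t i : Int) :
    (i ∈ PySem.Set.add (PySem.Set.add (PySem.Set.ofList T) (t - 1)) (t + 1)) ↔
      (i ∈ T ∨ i = t - 1 ∨ i = t + 1) := by
  rw [PySem.Set.mem_add, PySem.Set.mem_add, PySem.Set.mem_ofList]
  tauto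

lemma foldl_push_filter (p : Int → Bool) (l : List Int) (acc : Array Int) :
    (l.foldl (fun r i => if p i then r.push i else r) acc).toList
      = acc.toList ++ l.filter p := by
  induction l generalizing acc with
  | nil => simp
  | cons x l ih =>
    simp only [List.foldl_cons, List.filter_cons]
    by_cases hx : p x = true
    · rw [hx, if_pos rfl, ih, Array.toList_push]
      simp
    · rw [if_neg (by simp [hx]), ih]
      simp [hx]

theorem getPositions_spec : Claim_equal_getPositions := by
  intro T n _dom
  unfold Spec_getPositions getPositions getPositions_alt
  rw [foldl_push_filter, Array.toList_empty, List.nil_append]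
  split
  · rename_i h
    rw [List.filter_eq_nil_iff]
    intro a _ha hsol
    rw [checkSolution, Bool.and_eq_true, Bool.and_eq_true, checkRow_iff,
      checkDiagonal_iff] at hsol
    obtain ⟨⟨hrow, -⟩, hdiag⟩ := hsol
    have hN : T.Nodup := (List.nodup_append.mp hrow).1
    have hD : ∀ j : Nat, (hj : j + 1 < T.length) → (T[j] - T[j+1]).natAbs ≠ 1 := by
      intro j hj
      have := hdiag j (by simp; omega)
      rwa [List.getElem_append_left (by omega), List.getElem_append_left hj] at this
    rcases h with h | h
    · exact h ((ofList_len_iff T).mpr hN)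
    · rw [← Bool.not_eq_false, zipAny_iff] at h
      exact h hD
  · rename_i h
    rw [not_or] at h
    obtain ⟨hlen0, hzip⟩ := h
    have hlen := not_ne_iff.mp hlen0
    have hN : T.Nodup := (ofList_len_iff T).mp hlen
    have hzip2 : ((T.zip T.tail).any (fun p => (p.1 - p.2).natAbs == 1)) = false := by
      simpa using hzip
    have hD := (zipAny_iff T).mp hzip2
    apply List.filter_congr
    intro x _hx
    rw [Bool.eq_iff_iff, checkSolution_append_iff T x hN hD,
      Bool.not_eq_true', ← Bool.not_eq_true, PySem.Set.contains_iff]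
    cases hL : T.getLast? with
    | none =>
      rw [List.getLast?_eq_none_iff] at hL
      subst hL
      simp
    | some t =>
      rw [mem_forbidden]
      constructor
      · rintro ⟨hm, hl⟩
        have := hl t rfl
        rintro (h | h | h)
        · exact hm h
        · subst h; omega
        · subst h; omega
      · intro hnot
        refine ⟨fun hm => hnot (Or.inl hm), ?_⟩
        intro t' ht'
        injection ht' with ht'
        subst ht'
        intro habs
        rcases Int.natAbs_eq_iff.mp habs with h | h
        · exact hnot (Or.inr (Or.inl (by omega)))
        · exact hnot (Or.inr (Or.inr (by omega)))
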